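-- pv_equiv track=rewrite | github.com/LenX21/jobeasy-algorithms-course | algorithms_elena/hw_5/sum_of_odd_numbers.py | sum_odd_numbers_for
-- ===== SOURCE A (Python) =====
-- def sum_odd_numbers_for(n):
--     v = n * (n-1)
--     counter = 0
--     res = []
--     sum_odd = 0
--     while counter != n:
--         if v % 2 != 0:
--             sum_odd += v
--             counter += 1
--             res.append(v)
--         v += 1
--     return f"{res} = {sum_odd}"
-- ===== SOURCE B (Python) =====
-- def sum_odd_numbers_for(n):
--     res = [n * (n - 1) + 1 + 2 * k for k in range(n)]
--     return f"{res} = {n**3}"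
-- ===== Notes on version B (the rewrite author's own statement) =====
-- stated objective: simpler
-- what changed: B builds the n odd numbers directly as a comprehension n*(n-1)+1+2k over range(n) and returns the sum as the closed form n**3, replacing A's while-loop that scans every integer, tests parity, and accumulates the sum.
-- outside the precondition, e.g. on sum_odd_numbers_for(-1): A does not finish within the time limit, B returns '[] = -1'
import Mathlib
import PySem

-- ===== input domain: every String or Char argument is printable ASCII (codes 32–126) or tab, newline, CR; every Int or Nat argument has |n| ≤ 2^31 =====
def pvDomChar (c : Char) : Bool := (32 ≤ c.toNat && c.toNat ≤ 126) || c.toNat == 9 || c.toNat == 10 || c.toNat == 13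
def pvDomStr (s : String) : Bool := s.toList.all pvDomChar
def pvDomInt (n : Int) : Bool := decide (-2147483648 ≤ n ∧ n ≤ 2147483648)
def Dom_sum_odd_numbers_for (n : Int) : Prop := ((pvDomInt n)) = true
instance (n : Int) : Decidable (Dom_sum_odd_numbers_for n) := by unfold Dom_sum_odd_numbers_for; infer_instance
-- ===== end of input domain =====

-- B builds the n odd numbers directly (first odd is n*(n-1)+1, step 2) and returns the
-- sum as the closed form n**3, instead of A's while-loop scanning every integer with a
-- parity test and a running sum; objective: simpler.

-- f"{res} = {sum}" with res a Python list of ints (shared, exact f-string formatting)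
def fmtResult (res : List Int) (s : Int) : String :=
  "[" ++ String.intercalate ", " (res.map PySem.Int.toStr) ++ "]" ++ " = " ++ PySem.Int.toStr s

-- ===== PORT A =====
-- A's 'while counter != n' loop; fuel (2*n).toNat+1 is exactly the number of
-- iterations the Python loop performs when 0 ≤ n (Pre_); it never runs out there.
def loopA (n : Int) : Nat → Int → Int → List Int → Int → List Int × Int
  | 0, _, _, res, s => (res, s)
  | fuel+1, v, c, res, s =>
    if c ≠ n then
      if v % 2 ≠ 0 then loopA n fuel (v+1) (c+1) (res ++ [v]) (s + v)
      else loopA n fuel (v+1) c res s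
    else (res, s)

def sum_odd_numbers_for (n : Int) : String :=
  let r := loopA n ((2 * n).toNat + 1) (n * (n - 1)) 0 [] 0
  fmtResult r.1 r.2

-- ===== PORT B =====
def sum_odd_numbers_for_alt (n : Int) : String :=
  fmtResult ((PySem.List.pyRange 0 n 1).map (fun k => n * (n - 1) + 1 + 2 * k)) (n ^ 3)

-- ===== PRECONDITION & SPEC =====
-- A's while loop never terminates for n < 0 (counter only increases from 0), so
-- Pre_ admits exactly the inputs on which the Python A returns.
def Pre_sum_odd_numbers_for (n : Int) : Prop := 0 ≤ n
instance (n : Int) : Decidable (Pre_sum_odd_numbers_for n) := by unfold Pre_sum_odd_numbers_for; infer_instance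
def pvWitness_sum_odd_numbers_for : Int := (3)

def Spec_sum_odd_numbers_for (n : Int) (out : String) : Prop := out = sum_odd_numbers_for_alt n
instance (n : Int) (out : String) : Decidable (Spec_sum_odd_numbers_for n out) := by unfold Spec_sum_odd_numbers_for; infer_instance

-- ===== CLAIM (what is proved, stated in full; the proofs are below) =====
def Claim_equal_sum_odd_numbers_for : Prop := ∀ (n : Int), Dom_sum_odd_numbers_for n → Pre_sum_odd_numbers_for n → Spec_sum_odd_numbers_for n (sum_odd_numbers_for n)

-- ===== LEMMAS AND PROOFS =====

lemma loopA_step_even (n : Int) (fuel : Nat) (v c : Int) (res : List Int) (s : Int)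
    (hcn : c ≠ n) (hv : v % 2 = 0) :
    loopA n (fuel + 1) v c res s = loopA n fuel (v + 1) c res s := by
  simp [loopA, hcn, hv]

lemma loopA_step_odd (n : Int) (fuel : Nat) (v c : Int) (res : List Int) (s : Int)
    (hcn : c ≠ n) (hv : v % 2 ≠ 0) :
    loopA n (fuel + 1) v c res s = loopA n fuel (v + 1) (c + 1) (res ++ [v]) (s + v) := by
  simp [loopA, hcn, hv]

-- From an even v with k = n - counter steps left, A's loop appends exactly the k odds
-- v+1, v+3, … and adds their sum.
lemma loopA_even (n : Int) (k : Nat) : ∀ (v c : Int) (res : List Int) (s : Int),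
    v % 2 = 0 → c + k = n →
    loopA n (2 * k + 1) v c res s
      = (res ++ (List.range k).map (fun i : Nat => v + 1 + 2 * (i : Int)),
         s + ((List.range k).map (fun i : Nat => v + 1 + 2 * (i : Int))).sum) := by
  induction k with
  | zero =>
    intro v c res s hv hc
    have : c = n := by omega
    simp [loopA, this]
  | succ k ih =>
    intro v c res s hv hc
    have hcn : c ≠ n := by push_cast at hc; omega
    have hcn1 : c + 1 + (k : Int) = n := by push_cast at hc ⊢; omega
    have h2 : 2 * (k + 1) + 1 = (2 * k + 1) + 1 + 1 := by omega
    rw [h2, loopA_step_even n _ v c res s hcn hv,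
        loopA_step_odd n _ (v + 1) c res s hcn (by omega),
        ih (v + 1 + 1) (c + 1) (res ++ [v + 1]) (s + (v + 1)) (by omega) hcn1]
    have hmap : (List.range (k + 1)).map (fun i : Nat => v + 1 + 2 * (i : Int))
        = (v + 1) :: (List.range k).map (fun i : Nat => v + 1 + 1 + 1 + 2 * (i : Int)) := by
      rw [List.range_succ_eq_map, List.map_cons, List.map_map]
      congr 1
      · simp
      · apply List.map_congr_left; intro i _; simp; ring
    rw [hmap, List.sum_cons]
    simp only [Prod.mk.injEq]
    exact ⟨by simp, by ring⟩

-- arithmetic series sum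
lemma sum_lin (a : Int) : ∀ (k : Nat),
    ((List.range k).map (fun i : Nat => a + 2 * (i : Int))).sum = k * a + k * (k - 1) := by
  intro k
  induction k with
  | zero => simp
  | succ k ih =>
    rw [List.range_succ, List.map_append, List.sum_append, ih]
    simp
    ring

-- ===== VERDICT (by name: the statement is the Claim_ definition above) =====
theorem sum_odd_numbers_for_spec : Claim_equal_sum_odd_numbers_for := by
  unfold Claim_equal_sum_odd_numbers_for Spec_sum_odd_numbers_for
  intro n _ hpre
  unfold Pre_sum_odd_numbers_for at hpre
  unfold sum_odd_numbers_for sum_odd_numbers_for_alt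
  have hfuel : (2 * n).toNat + 1 = 2 * n.toNat + 1 := by omega
  have hev : (n * (n - 1)) % 2 = 0 := by
    have h := Int.even_mul_succ_self (n - 1)
    have h2 : Even (n * (n - 1)) := by
      have e : (n - 1) * (n - 1 + 1) = n * (n - 1) := by ring
      rwa [e] at h
    exact Int.even_iff.mp h2
  have hc : (0 : Int) + (n.toNat : Int) = n := by omega
  rw [hfuel, loopA_even n n.toNat (n * (n - 1)) 0 [] 0 hev hc]
  have hk : ((n.toNat : Int)) = n := by omega
  have hlist : (PySem.List.pyRange 0 n 1).map (fun k => n * (n - 1) + 1 + 2 * k)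
      = (List.range n.toNat).map (fun i : Nat => n * (n - 1) + 1 + 2 * (i : Int)) := by
    rw [PySem.List.pyRange_one]
    simp [List.map_map]
  rw [hlist]
  have hsum : ((List.range n.toNat).map
      (fun i : Nat => n * (n - 1) + 1 + 2 * (i : Int))).sum = n ^ 3 := by
    have hl := sum_lin (n * (n - 1) + 1) n.toNat
    rw [hk] at hl
    rw [hl]
    ring
  simp only [List.nil_append]
  rw [hsum]
  norm_num
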